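-- pv_equiv track=rewrite | github.com/lauli/myalfredskill | methods.py | get_index_where_next_char_occurs
-- ===== SOURCE A (Python) =====
-- def get_index_where_next_char_occurs(iso):
--     """
--     Calculates next index where a character is situated.
--     i.e. 01234A -> index 5
--     :param iso: string
--     :return: index position
--     """
--     if iso is '':
--         return None
--
--     i = 0
--     numbers = '0123456789'
--
--     for char in iso:
--         if char not in numbers:
--             return i
--         i += 1
--
--     return None
-- ===== SOURCE B (Python) =====
-- def get_index_where_next_char_occurs(iso):
--     rest = iso.lstrip('0123456789')
--     if rest == '':
--         return None
--     return len(iso) - len(rest)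
-- ===== Notes on version B (the rewrite author's own statement) =====
-- stated objective: simpler
-- what changed: Replaces the counter-maintaining character loop with a single lstrip('0123456789') and a length difference; empty and all-digit strings both fall out of the rest == '' test.
import Mathlib
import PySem

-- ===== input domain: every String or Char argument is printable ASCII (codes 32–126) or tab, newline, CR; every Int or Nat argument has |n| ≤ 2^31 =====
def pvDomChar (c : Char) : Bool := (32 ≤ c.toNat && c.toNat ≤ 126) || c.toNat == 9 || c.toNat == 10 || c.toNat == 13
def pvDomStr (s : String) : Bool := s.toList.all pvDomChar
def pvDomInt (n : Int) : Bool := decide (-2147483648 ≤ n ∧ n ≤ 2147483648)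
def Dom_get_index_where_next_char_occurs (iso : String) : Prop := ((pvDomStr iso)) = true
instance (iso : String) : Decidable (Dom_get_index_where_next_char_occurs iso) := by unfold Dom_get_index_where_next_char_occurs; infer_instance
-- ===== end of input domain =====

-- B replaces A's counter-maintaining character loop by lstrip('0123456789') and a length difference (objective: simpler).


-- ===== PORT A =====
-- the loop `for char in iso: if char not in numbers: return i; i += 1`
-- ('char in numbers' for a single character is membership of that character in the digit string)
def pvGoA : List Char → Int → Option Int
  | [], _ => none
  | c :: rest, i =>
    if ("0123456789".toList.contains c) = false then some i
    else pvGoA rest (i + 1)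

def get_index_where_next_char_occurs (iso : String) : Option Int :=
  if iso = "" then none
  else pvGoA iso.toList 0

-- ===== PORT B =====
-- iso.lstrip('0123456789') removes exactly the leading run of characters belonging to
-- the digit set: ported by hand as dropWhile (exact for lstrip with a chars argument).
def get_index_where_next_char_occurs_alt (iso : String) : Option Int :=
  let rest := iso.toList.dropWhile (fun c => "0123456789".toList.contains c)
  if rest = [] then none
  else some ((iso.toList.length : Int) - rest.length)

-- ===== PRECONDITION & SPEC =====
def Spec_get_index_where_next_char_occurs (iso : String) (out : Option Int) : Prop := out = get_index_where_next_char_occurs_alt iso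
instance (iso : String) (out : Option Int) : Decidable (Spec_get_index_where_next_char_occurs iso out) := by unfold Spec_get_index_where_next_char_occurs; infer_instance

-- ===== CLAIM (what is proved, stated in full; the proofs are below) =====
def Claim_equal_get_index_where_next_char_occurs : Prop := ∀ (iso : String), Dom_get_index_where_next_char_occurs iso → Spec_get_index_where_next_char_occurs iso (get_index_where_next_char_occurs iso)

-- ===== LEMMAS AND PROOFS =====
theorem pvGoA_eq (l : List Char) : ∀ i : Int,
    pvGoA l i =
      (if l.dropWhile (fun c => "0123456789".toList.contains c) = [] then none
       else some (i + ((l.length : Int) -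
         (l.dropWhile (fun c => "0123456789".toList.contains c)).length))) := by
  induction l with
  | nil => intro i; simp [pvGoA]
  | cons c t ih =>
    intro i
    by_cases hc : ("0123456789".toList.contains c) = true
    · simp only [pvGoA, List.dropWhile_cons, hc, if_true, Bool.true_eq_false, if_false, ih]
      split_ifs with h
      · rfl
      · have hlen : (t.dropWhile (fun c => "0123456789".toList.contains c)).length ≤ t.length :=
          List.length_dropWhile_le _ _
        congr 1
        simp only [List.length_cons]
        push_cast
        omega
    · simp only [Bool.not_eq_true] at hc
      simp only [pvGoA, hc, List.dropWhile_cons, if_true,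
        Bool.false_eq_true, if_false, List.cons_ne_nil, List.length_cons]
      congr 1
      push_cast
      omega

theorem get_index_where_next_char_occurs_spec : Claim_equal_get_index_where_next_char_occurs := by
  intro iso _
  unfold Spec_get_index_where_next_char_occurs get_index_where_next_char_occurs
    get_index_where_next_char_occurs_alt
  by_cases h : iso = ""
  · subst h; simp
  · simp only [h, if_false, pvGoA_eq]
    split_ifs with hd
    · rfl
    · simp
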